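-- pv_equiv track=rewrite | github.com/SergioAle210/Semantic-Parser | tools/analysis_core.py | _is_digits
-- ===== SOURCE A (Python) =====
-- def _is_digits(s: str) -> bool:
--     if len(s) == 0:
--         return False
--     i = 0
--     while i < len(s):
--         ch = s[i]
--         if ch < "0" or ch > "9":
--             return False
--         i += 1
--     return True
-- ===== SOURCE B (Python) =====
-- import re
--
-- _DIGITS_RE = re.compile(r"[0-9]+")
--
-- def _is_digits(s: str) -> bool:
--     # Delegate the whole-string check to the regex engine: [0-9]+ matches a
--     # non-empty run of ASCII digits; fullmatch requires it to cover all of s.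
--     return _DIGITS_RE.fullmatch(s) is not None
-- ===== Notes on version B (the rewrite author's own statement) =====
-- stated objective: idiomatic
-- what changed: Replaces the hand-written index-based while loop with early exit by a single regex fullmatch against [0-9]+, delegating the scan to the regex engine.
import Mathlib
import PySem

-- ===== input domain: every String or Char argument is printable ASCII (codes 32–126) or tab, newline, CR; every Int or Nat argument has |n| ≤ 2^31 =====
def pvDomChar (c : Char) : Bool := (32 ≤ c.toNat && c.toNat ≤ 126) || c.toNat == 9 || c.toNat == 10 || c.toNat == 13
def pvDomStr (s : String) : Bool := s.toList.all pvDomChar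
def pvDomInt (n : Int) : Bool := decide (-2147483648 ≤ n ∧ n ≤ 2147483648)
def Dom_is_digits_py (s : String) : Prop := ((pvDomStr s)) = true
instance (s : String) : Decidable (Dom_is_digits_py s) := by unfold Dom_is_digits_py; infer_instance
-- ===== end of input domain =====

-- B replaces A's index-based while loop (early exit on a non-digit) with a single
-- regex fullmatch against [0-9]+ (non-empty run of ASCII digits); idiomatic, same cost.

-- ===== PORT A =====
-- the while loop 'while i < len(s): ch = s[i]; if ch < "0" or ch > "9": return False; i += 1'
-- (i stays in [0, len], so s[i] is cs[i]?; the none branch is unreachable)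
def isDigitsLoop (cs : List Char) (i : Nat) : Bool :=
  if i < cs.length then
    match cs[i]? with
    | some ch => if ch < '0' || ch > '9' then false else isDigitsLoop cs (i + 1)
    | none => false
  else true
termination_by cs.length - i

def is_digits_py (s : String) : Bool :=
  if s.toList.length = 0 then false else isDigitsLoop s.toList 0

-- ===== PORT B =====
-- port of re.fullmatch(r"[0-9]+", s) is not None: the pattern matches the whole
-- string iff s is a non-empty sequence of characters in ['0','9']
def is_digits_py_alt (s : String) : Bool :=
  !s.toList.isEmpty && s.toList.all (fun c => '0' ≤ c && c ≤ '9')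

-- ===== PRECONDITION & SPEC =====
def Spec_is_digits_py (s : String) (out : Bool) : Prop := out = is_digits_py_alt s
instance (s : String) (out : Bool) : Decidable (Spec_is_digits_py s out) := by unfold Spec_is_digits_py; infer_instance

-- ===== CLAIM (what is proved, stated in full; the proofs are below) =====
def Claim_equal_is_digits_py : Prop := ∀ (s : String), Dom_is_digits_py s → Spec_is_digits_py s (is_digits_py s)

-- ===== LEMMAS AND PROOFS =====
theorem isDigitsLoop_eq_all (cs : List Char) (i : Nat) :
    isDigitsLoop cs i = (cs.drop i).all (fun c => '0' ≤ c && c ≤ '9') := by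
  induction hn : cs.length - i using Nat.strong_induction_on generalizing i with
  | _ n ih =>
    rw [isDigitsLoop]
    by_cases h : i < cs.length
    · simp only [h, if_true]
      have hget : cs[i]? = some cs[i] := List.getElem?_eq_getElem h
      rw [hget]
      have hdrop : cs.drop i = cs[i] :: cs.drop (i + 1) := List.drop_eq_getElem_cons h
      rw [hdrop, List.all_cons]
      by_cases hc : cs[i] < '0' ∨ '9' < cs[i]
      · have h1 : (cs[i] < '0' || cs[i] > '9') = true := by
          rcases hc with h1 | h1 <;> simp [h1]
        have h2 : ('0' ≤ cs[i] && cs[i] ≤ '9') = false := by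
          rcases hc with h1 | h1 <;> simp [not_le.mpr h1]
        simp [h1, h2]
      · rw [not_or] at hc
        simp only [not_lt] at hc
        have h1 : (cs[i] < '0' || cs[i] > '9') = false := by
          simp [not_lt.mpr hc.1, not_lt.mpr hc.2]
        have h2 : ('0' ≤ cs[i] && cs[i] ≤ '9') = true := by simp [hc.1, hc.2]
        simp only [h1, h2, Bool.false_eq_true, if_false, Bool.true_and]
        exact ih (cs.length - (i + 1)) (by omega) (i + 1) rfl
    · simp only [h, if_false]
      rw [List.drop_eq_nil_of_le (by omega)]
      rfl

-- ===== VERDICT (by name: the statement is the Claim_ definition above) =====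
theorem is_digits_py_spec : Claim_equal_is_digits_py := by
  intro s _
  unfold Spec_is_digits_py is_digits_py is_digits_py_alt
  rw [isDigitsLoop_eq_all]
  cases s.toList with
  | nil => simp
  | cons c cs => simp
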